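-- pv_equiv track=rewrite | github.com/thisprojects/platform-pygame | map_loader.py | _merge_platforms
-- ===== SOURCE A (Python) =====
-- def _merge_platforms(platform_tiles):
--     """Merge adjacent horizontal platform tiles into longer platforms."""
--     if not platform_tiles:
--         return []
--
--     # Sort by y, then x
--     platform_tiles.sort(key=lambda p: (p[1], p[0]))
--
--     merged = []
--     current = None
--
--     for x, y, width, height in platform_tiles:
--         if current is None:
--             current = [x, y, width, height]
--         elif current[1] == y and current[0] + current[2] == x:
--             # Same row and adjacent - extend current platform
--             current[2] += width
--         else:
--             # Different row or not adjacent - save current and start new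
--             merged.append(tuple(current))
--             current = [x, y, width, height]
--
--     # Don't forget the last platform
--     if current is not None:
--         merged.append(tuple(current))
--
--     return merged
-- ===== SOURCE B (Python) =====
-- def _merge_platforms(platform_tiles):
--     """Merge adjacent horizontal platform tiles into longer platforms.
--
--     Two staged passes instead of a running merged-platform accumulator:
--     after the same in-place sort, split the list into maximal chains of
--     pairwise-adjacent tiles (zip of consecutive tiles), then collapse each
--     chain by summing its widths.
--     """
--     if not platform_tiles:
--         return []
--
--     platform_tiles.sort(key=lambda p: (p[1], p[0]))
--
--     # stage 1: chains of tiles where each tile starts exactly where the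
--     # previous one ends (same row)
--     chains = [[platform_tiles[0]]]
--     for prev, cur in zip(platform_tiles, platform_tiles[1:]):
--         if cur[1] == prev[1] and cur[0] == prev[0] + prev[2]:
--             chains[-1].append(cur)
--         else:
--             chains.append([cur])
--
--     # stage 2: collapse each chain into one platform
--     return [(c[0][0], c[0][1], sum(t[2] for t in c), c[0][3]) for c in chains]
-- ===== Notes on version B (the rewrite author's own statement) =====
-- stated objective: alternative
-- what changed: B drops A's running merged-platform accumulator (which compares each tile against the current platform's accumulated right edge) in favour of two staged passes: split the sorted list into maximal chains using a pairwise zip adjacency test between consecutive tiles, then collapse each chain by summing its widths; correctness rests on the proved invariant that the accumulated right edge always equals the previous tile's right edge.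
import Mathlib
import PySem

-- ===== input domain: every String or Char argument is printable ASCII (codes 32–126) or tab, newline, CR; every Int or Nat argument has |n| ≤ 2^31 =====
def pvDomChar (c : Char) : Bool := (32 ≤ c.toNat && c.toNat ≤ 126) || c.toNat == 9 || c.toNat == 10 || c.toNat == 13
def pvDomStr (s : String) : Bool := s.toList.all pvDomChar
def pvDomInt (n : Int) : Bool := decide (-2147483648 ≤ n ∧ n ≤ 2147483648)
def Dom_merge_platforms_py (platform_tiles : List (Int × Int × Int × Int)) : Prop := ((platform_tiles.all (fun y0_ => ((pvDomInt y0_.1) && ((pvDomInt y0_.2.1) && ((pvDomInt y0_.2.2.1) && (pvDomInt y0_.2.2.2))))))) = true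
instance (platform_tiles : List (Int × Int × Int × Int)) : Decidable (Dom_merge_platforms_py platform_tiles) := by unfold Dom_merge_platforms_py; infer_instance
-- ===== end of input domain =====

-- B replaces A's running merged-platform accumulator (compared against its accumulated right
-- edge) by two staged passes: split the sorted list into maximal chains via a pairwise zip
-- adjacency test between consecutive tiles, then collapse each chain by summing widths.
-- Objective: alternative. Both Pythons sort the argument in place identically; the
-- equivalence proved here is about the return value.

-- ===== PORT A =====
-- the `for x, y, width, height in platform_tiles` loop with state current : Option,
-- including the trailing `merged.append(tuple(current))`
def pvGoA : List (Int × Int × Int × Int) → Option (Int × Int × Int × Int) → List (Int × Int × Int × Int)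
  | [], none => []
  | [], some c => [c]
  | (x, y, w, h) :: rest, none => pvGoA rest (some (x, y, w, h))
  | (x, y, w, h) :: rest, some (cx, cy, cw, ch) =>
    if cy = y ∧ cx + cw = x then
      pvGoA rest (some (cx, cy, cw + w, ch))
    else
      (cx, cy, cw, ch) :: pvGoA rest (some (x, y, w, h))

def merge_platforms_py (platform_tiles : List (Int × Int × Int × Int)) : List (Int × Int × Int × Int) :=
  if platform_tiles = [] then []
  else
    pvGoA (PySem.List.sorted2 platform_tiles (fun p => p.2.1) (fun p => p.1)) none

-- ===== PORT B =====
-- stage-2 comprehension body: (c[0][0], c[0][1], sum(t[2] for t in c), c[0][3])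
def pvCollapse (c : List (Int × Int × Int × Int)) : Int × Int × Int × Int :=
  match c with
  | [] => (0, 0, 0, 0)  -- unreachable: chains are never empty (Python would raise on c[0])
  | u :: us => (u.1, u.2.1, ((u :: us).map (fun t => t.2.2.1)).sum, u.2.2.2)

-- one step of the `for prev, cur in zip(...)` loop; state = (finished chains, chains[-1])
def pvStepB (st : List (List (Int × Int × Int × Int)) × List (Int × Int × Int × Int))
    (pc : (Int × Int × Int × Int) × (Int × Int × Int × Int)) :
    List (List (Int × Int × Int × Int)) × List (Int × Int × Int × Int) :=
  match st, pc with
  | (done, cur), (prev, c) =>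
    if c.2.1 = prev.2.1 ∧ c.1 = prev.1 + prev.2.2.1 then (done, cur ++ [c])
    else (done ++ [cur], [c])

def merge_platforms_py_alt (platform_tiles : List (Int × Int × Int × Int)) : List (Int × Int × Int × Int) :=
  if platform_tiles = [] then []
  else
    match PySem.List.sorted2 platform_tiles (fun p => p.2.1) (fun p => p.1) with
    | [] => []  -- unreachable: the sorted list of a nonempty list is nonempty
    | t :: rest =>
      let st := ((t :: rest).zip rest).foldl pvStepB ([], [t])
      (st.1 ++ [st.2]).map pvCollapse

-- ===== PRECONDITION & SPEC =====
def Spec_merge_platforms_py (platform_tiles : List (Int × Int × Int × Int)) (out : List (Int × Int × Int × Int)) : Prop := out = merge_platforms_py_alt platform_tiles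
instance (platform_tiles : List (Int × Int × Int × Int)) (out : List (Int × Int × Int × Int)) : Decidable (Spec_merge_platforms_py platform_tiles out) := by unfold Spec_merge_platforms_py; infer_instance

-- ===== CLAIM (what is proved, stated in full; the proofs are below) =====
def Claim_equal_merge_platforms_py : Prop := ∀ (platform_tiles : List (Int × Int × Int × Int)), Dom_merge_platforms_py platform_tiles → Spec_merge_platforms_py platform_tiles (merge_platforms_py platform_tiles)

-- ===== LEMMAS AND PROOFS =====

-- common recursive specification: the merged platforms, with the current chain kept as
-- first tile `u` plus later tiles `us`, each new tile tested pairwise against the last tile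
def pvS : (Int × Int × Int × Int) → List (Int × Int × Int × Int) → List (Int × Int × Int × Int) → List (Int × Int × Int × Int)
  | u, us, [] => [pvCollapse (u :: us)]
  | u, us, c :: rest =>
    let p := (u :: us).getLast (by simp)
    if c.2.1 = p.2.1 ∧ c.1 = p.1 + p.2.2.1 then pvS u (us ++ [c]) rest
    else pvCollapse (u :: us) :: pvS c [] rest

theorem pvCollapse_cons (u : Int × Int × Int × Int) (us : List (Int × Int × Int × Int)) :
    pvCollapse (u :: us) = (u.1, u.2.1, u.2.2.1 + (us.map (fun t => t.2.2.1)).sum, u.2.2.2) := by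
  simp [pvCollapse]

-- A's scan equals pvS: the accumulated current equals the collapse of the chain, its y is the
-- chain's common y, and its right edge equals the last tile's right edge
theorem pvGoA_eq_S (rest : List (Int × Int × Int × Int)) :
    ∀ (u : Int × Int × Int × Int) (us : List (Int × Int × Int × Int)),
    (∀ q ∈ us, q.2.1 = u.2.1) →
    (u.1 + (u.2.2.1 + (us.map (fun t => t.2.2.1)).sum) =
      ((u :: us).getLast (by simp)).1 + ((u :: us).getLast (by simp)).2.2.1) →
    pvGoA rest (some (pvCollapse (u :: us))) = pvS u us rest := by
  induction rest with
  | nil => intro u us _ _; simp [pvGoA, pvS, pvCollapse_cons]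
  | cons c rest ih =>
    intro u us hy hx
    obtain ⟨x, y, w, h⟩ := c
    have hplast : ((u :: us).getLast (by simp)).2.1 = u.2.1 := by
      have hmem := List.getLast_mem (l := u :: us) (by simp)
      rcases List.mem_cons.mp hmem with h0 | h0
      · rw [h0]
      · exact hy _ h0
    rw [pvCollapse_cons, pvGoA, pvS]
    have hcond : (u.2.1 = y ∧ u.1 + (u.2.2.1 + (us.map (fun t => t.2.2.1)).sum) = x) ↔
        ((x, y, w, h).2.1 = ((u :: us).getLast (by simp)).2.1 ∧
         (x, y, w, h).1 = ((u :: us).getLast (by simp)).1 + ((u :: us).getLast (by simp)).2.2.1) := by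
      constructor
      · rintro ⟨h1, h2⟩; exact ⟨by simp [hplast, h1], by simp [← hx, h2]⟩
      · rintro ⟨h1, h2⟩; exact ⟨by simp [hplast] at h1; omega, by simp at h1 h2; omega⟩
    by_cases hc : u.2.1 = y ∧ u.1 + (u.2.2.1 + (us.map (fun t => t.2.2.1)).sum) = x
    · rw [if_pos hc, if_pos (hcond.mp hc)]
      have := ih u (us ++ [(x, y, w, h)])
        (by intro q hq; rcases List.mem_append.mp hq with h0 | h0
            · exact hy q h0
            · simp at h0; rw [h0]; exact hc.1.symm)
        (by have hlast : ((u :: (us ++ [(x, y, w, h)])).getLast (by simp)) = (x, y, w, h) := by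
              simp
            rw [hlast]; simp; omega)
      rw [pvCollapse_cons] at this
      simp only [List.map_append, List.sum_append] at this
      simpa [← add_assoc] using this
    · rw [if_neg hc, if_neg (fun hcc => hc (hcond.mpr hcc))]
      rw [pvCollapse_cons]
      congr 1
      have := ih (x, y, w, h) [] (by simp) (by simp)
      rw [pvCollapse_cons] at this
      simpa using this

-- B's fold equals pvS: the remaining zip pairs start with the last tile of the current chain
theorem pvFoldB_eq_S (rest : List (Int × Int × Int × Int)) :
    ∀ (done : List (List (Int × Int × Int × Int))) (u : Int × Int × Int × Int)
      (us : List (Int × Int × Int × Int)),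
    (let st := ((((u :: us).getLast (by simp)) :: rest).zip rest).foldl pvStepB (done, u :: us)
     (st.1 ++ [st.2]).map pvCollapse) = done.map pvCollapse ++ pvS u us rest := by
  induction rest with
  | nil => intro done u us; simp [pvS]
  | cons c rest ih =>
    intro done u us
    simp only [List.zip_cons_cons, List.foldl_cons, pvS]
    by_cases hc : c.2.1 = ((u :: us).getLast (by simp)).2.1 ∧
        c.1 = ((u :: us).getLast (by simp)).1 + ((u :: us).getLast (by simp)).2.2.1
    · rw [if_pos hc]
      simp only [pvStepB, if_pos hc]
      have hlast : ((u :: (us ++ [c])).getLast (by simp)) = c := by simp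
      have := ih done u (us ++ [c])
      rw [hlast] at this
      simpa using this
    · rw [if_neg hc]
      simp only [pvStepB, if_neg hc]
      have := ih (done ++ [u :: us]) c []
      simp only [List.getLast_singleton] at this
      rw [this]
      simp

-- ===== VERDICT (by name: the statement is the Claim_ definition above) =====
theorem merge_platforms_py_spec : Claim_equal_merge_platforms_py := by
  intro tiles _
  unfold Spec_merge_platforms_py merge_platforms_py merge_platforms_py_alt
  split
  · rfl
  · cases hs : PySem.List.sorted2 tiles (fun p => p.2.1) (fun p => p.1) with
    | nil => simp [pvGoA]
    | cons t rest =>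
      obtain ⟨x, y, w, h⟩ := t
      have hA : pvGoA ((x, y, w, h) :: rest) none = pvS (x, y, w, h) [] rest := by
        rw [pvGoA]
        have := pvGoA_eq_S rest (x, y, w, h) [] (by simp) (by simp)
        rw [pvCollapse_cons] at this
        simpa using this
      have hB := pvFoldB_eq_S rest [] (x, y, w, h) []
      simp only [List.getLast_singleton] at hB
      simp only [hA]
      simpa using hB.symm
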